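-- pv_equiv track=rewrite | github.com/HassanDawy/fed-signal-chatbot | src/evaluate_informational.py | _classify_era
-- ===== SOURCE A (Python) =====
-- CUTOFF = "2023-10-01"
--
-- def _classify_era(expected_dates: list[str]) -> str:
--     """training_era: pre_cutoff / post_cutoff / mixed by 2023-10-01 boundary."""
--     if not expected_dates:
--         return "post_cutoff"  # shouldn't happen
--     pre = [d for d in expected_dates if d <= CUTOFF]
--     post = [d for d in expected_dates if d > CUTOFF]
--     if pre and post:
--         return "mixed"
--     return "pre_cutoff" if pre else "post_cutoff"
-- ===== SOURCE B (Python) =====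
-- CUTOFF = "2023-10-01"
--
--
-- def _classify_era(expected_dates: list[str]) -> str:
--     """training_era from two aggregate reductions (min/max) instead of filtered lists."""
--     if not expected_dates:
--         return "post_cutoff"  # shouldn't happen
--     has_pre = min(expected_dates) <= CUTOFF
--     has_post = max(expected_dates) > CUTOFF
--     if has_pre and has_post:
--         return "mixed"
--     return "pre_cutoff" if has_pre else "post_cutoff"
-- ===== Notes on version B (the rewrite author's own statement) =====
-- stated objective: simpler
-- what changed: Replaces the two list-comprehension filters (building pre/post lists and testing their truthiness) with two min/max reductions: has_pre = min(dates) <= CUTOFF, has_post = max(dates) > CUTOFF, then the same three-way decision.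
import Mathlib
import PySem

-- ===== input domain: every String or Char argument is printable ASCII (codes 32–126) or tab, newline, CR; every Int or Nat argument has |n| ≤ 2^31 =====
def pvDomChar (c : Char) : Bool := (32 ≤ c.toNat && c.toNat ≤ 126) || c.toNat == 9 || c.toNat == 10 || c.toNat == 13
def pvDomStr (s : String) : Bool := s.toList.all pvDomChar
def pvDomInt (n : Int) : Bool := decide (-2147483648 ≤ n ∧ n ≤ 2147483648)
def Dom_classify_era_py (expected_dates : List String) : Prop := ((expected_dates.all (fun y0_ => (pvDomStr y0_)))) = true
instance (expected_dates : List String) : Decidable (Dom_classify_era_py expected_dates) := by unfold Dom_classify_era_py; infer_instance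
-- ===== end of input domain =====

-- B replaces A's two filter passes by min/max reductions; objective: simpler (same O(n) cost).

-- ===== PORT A =====
def pvCUTOFF : String := "2023-10-01"

-- pre = [d for d in expected_dates if d <= CUTOFF]; post = [d for d in expected_dates if d > CUTOFF]
-- (d <= CUTOFF ports as ¬(CUTOFF < d); Python's str comparison is code-point lexicographic = PySem.Chars.strLt)
def classify_era_py (expected_dates : List String) : String :=
  if expected_dates = [] then "post_cutoff"
  else
    let pre := expected_dates.filter (fun d => !(PySem.Chars.strLt pvCUTOFF.toList d.toList))
    let post := expected_dates.filter (fun d => PySem.Chars.strLt pvCUTOFF.toList d.toList)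
    if pre ≠ [] ∧ post ≠ [] then "mixed"
    else if pre ≠ [] then "pre_cutoff" else "post_cutoff"

-- ===== PORT B =====
-- min(expected_dates) / max(expected_dates) = PySem.List.min?/max?; both are some exactly when the list is nonempty,
-- so the `| _, _ =>` arm is Source B's empty-list guard.
def classify_era_py_alt (expected_dates : List String) : String :=
  match PySem.List.min? expected_dates (fun d => d.toList),
        PySem.List.max? expected_dates (fun d => d.toList) with
  | some mn, some mx =>
      let has_pre := !(PySem.Chars.strLt pvCUTOFF.toList mn.toList)
      let has_post := PySem.Chars.strLt pvCUTOFF.toList mx.toList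
      if has_pre && has_post then "mixed"
      else if has_pre then "pre_cutoff" else "post_cutoff"
  | _, _ => "post_cutoff"

-- ===== PRECONDITION & SPEC =====
def Spec_classify_era_py (expected_dates : List String) (out : String) : Prop := out = classify_era_py_alt expected_dates
instance (expected_dates : List String) (out : String) : Decidable (Spec_classify_era_py expected_dates out) := by unfold Spec_classify_era_py; infer_instance

-- ===== CLAIM (what is proved, stated in full; the proofs are below) =====
def Claim_equal_classify_era_py : Prop := ∀ (expected_dates : List String), Dom_classify_era_py expected_dates → Spec_classify_era_py expected_dates (classify_era_py expected_dates)

-- ===== LEMMAS AND PROOFS =====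

-- the two min?/max? instance bundles coincide
theorem pvMin?_lo (xs : List String) :
    @PySem.List.min? String (List Char) List.instLinearOrder.toLT LinearOrder.toDecidableLT xs String.toList
      = PySem.List.min? xs (fun d => d.toList) := by congr 1

theorem pvMax?_lo (xs : List String) :
    @PySem.List.max? String (List Char) List.instLinearOrder.toLT LinearOrder.toDecidableLT xs String.toList
      = PySem.List.max? xs (fun d => d.toList) := by congr 1

-- has_pre agrees with "pre filter nonempty"
theorem pvHasPre (xs : List String) (mn : String)
    (h : PySem.List.min? xs (fun d => d.toList) = some mn) :
    (!(PySem.Chars.strLt pvCUTOFF.toList mn.toList)) = true ↔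
      xs.filter (fun d => !(PySem.Chars.strLt pvCUTOFF.toList d.toList)) ≠ [] := by
  have hmem := PySem.List.min?_mem h
  have hmin := PySem.List.min?_isMin ((pvMin?_lo xs).trans h)
  simp only [PySem.Chars.strLt, Bool.not_eq_true', decide_eq_false_iff_not, ne_eq,
    List.filter_eq_nil_iff, not_forall, not_not]
  constructor
  · intro hle
    exact ⟨mn, hmem, fun hc => hle hc⟩
  · rintro ⟨d, hd, hlt⟩ hCmn
    exact hlt (lt_of_lt_of_le hCmn (hmin d hd))

theorem pvHasPost (xs : List String) (mx : String)
    (h : PySem.List.max? xs (fun d => d.toList) = some mx) :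
    PySem.Chars.strLt pvCUTOFF.toList mx.toList = true ↔
      xs.filter (fun d => PySem.Chars.strLt pvCUTOFF.toList d.toList) ≠ [] := by
  have hmem := PySem.List.max?_mem h
  have hmax := PySem.List.max?_isMax ((pvMax?_lo xs).trans h)
  simp only [PySem.Chars.strLt, decide_eq_true_eq, ne_eq, List.filter_eq_nil_iff,
    not_forall, not_not]
  constructor
  · intro hlt
    exact ⟨mx, hmem, hlt⟩
  · rintro ⟨d, hd, hlt⟩
    exact lt_of_le_of_lt' (hmax d hd) hlt

-- ===== VERDICT (by name: the statement is the Claim_ definition above) =====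
theorem classify_era_py_spec : Claim_equal_classify_era_py := by
  intro xs _
  unfold Spec_classify_era_py classify_era_py classify_era_py_alt
  by_cases hx : xs = []
  · subst hx; simp [PySem.List.min?, PySem.List.max?]
  · rcases Option.ne_none_iff_exists'.mp (fun hn => hx ((PySem.List.min?_eq_none_iff xs (fun d : String => d.toList)).mp hn)) with ⟨mn, hmn⟩
    rcases Option.ne_none_iff_exists'.mp (fun hn => hx ((PySem.List.max?_eq_none_iff xs (fun d : String => d.toList)).mp hn)) with ⟨mx, hmx⟩
    rw [hmn, hmx]
    simp only [if_neg hx]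
    have hp := pvHasPre xs mn hmn
    have hq := pvHasPost xs mx hmx
    by_cases h1 : (!(PySem.Chars.strLt pvCUTOFF.toList mn.toList)) = true <;>
      by_cases h2 : PySem.Chars.strLt pvCUTOFF.toList mx.toList = true <;>
        simp_all
    all_goals (obtain ⟨x, hxmem, -⟩ := hp; exact ⟨x, hxmem⟩)
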